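-- pv_equiv track=rewrite | github.com/SowmeshSharma0411/SAHI_Tracker | hit_n_run_latest_for_ref.py | detect_stop_and_flee
-- ===== SOURCE A (Python) =====
-- def detect_stop_and_flee(participant_id, motion_changes):
--     """
--     Detect if the participant stopped at any point after the accident but then fled.
--     """
--     stopped_at_any_time = False
--     moved_again = False
--
--     for change in motion_changes:
--         if change == 0:  # Participant stopped
--             stopped_at_any_time = True
--         elif change > 2 and stopped_at_any_time:  # Participant moved again
--             moved_again = True
--
--     # Hit-and-run if they stopped but then moved again (fled)
--     return stopped_at_any_time and moved_again
-- ===== SOURCE B (Python) =====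
-- def detect_stop_and_flee(participant_id, motion_changes):
--     """Two-phase: find the first stop (change == 0), then scan the remainder for a flee (change > 2)."""
--     changes = list(motion_changes)
--     if 0 not in changes:
--         return False
--     first_stop = changes.index(0)
--     return any(c > 2 for c in changes[first_stop + 1:])
-- ===== Notes on version B (the rewrite author's own statement) =====
-- stated objective: simpler
-- what changed: Replaces the single flag-accumulating pass (two booleans threaded through one loop) with a find-then-scan decomposition: locate the first 0, then test any(c > 2) in the suffix after it.
import Mathlib
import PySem

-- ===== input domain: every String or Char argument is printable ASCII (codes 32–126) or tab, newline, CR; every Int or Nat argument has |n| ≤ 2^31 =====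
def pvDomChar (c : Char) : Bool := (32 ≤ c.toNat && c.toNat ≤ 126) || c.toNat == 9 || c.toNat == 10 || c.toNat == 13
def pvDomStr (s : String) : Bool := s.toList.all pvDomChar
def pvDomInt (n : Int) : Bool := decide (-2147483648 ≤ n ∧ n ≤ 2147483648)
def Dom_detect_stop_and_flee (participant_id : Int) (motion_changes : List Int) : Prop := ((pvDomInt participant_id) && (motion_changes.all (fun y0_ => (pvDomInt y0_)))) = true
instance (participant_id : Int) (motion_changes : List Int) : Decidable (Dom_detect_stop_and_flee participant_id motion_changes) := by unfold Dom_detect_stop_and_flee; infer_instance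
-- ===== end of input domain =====

-- B replaces A's single flag-accumulating pass with a simpler find-first-0 then scan-the-suffix-for->2 decomposition (same cost).


-- ===== PORT A =====
def detect_stop_and_flee (participant_id : Int) (motion_changes : List Int) : Bool :=
  let st := motion_changes.foldl
    (fun (s : Bool × Bool) change =>
      if change == 0 then (true, s.2)
      else if change > 2 && s.1 then (s.1, true)
      else s)
    (false, false)
  st.1 && st.2

-- ===== PORT B =====
def detect_stop_and_flee_alt (participant_id : Int) (motion_changes : List Int) : Bool :=
  match PySem.List.index? motion_changes (0 : Int) with
  | none => false
  | some i => (PySem.List.slice motion_changes (some ((i : Int) + 1)) none).any (fun c => decide (c > 2))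

-- ===== PRECONDITION & SPEC =====
def Spec_detect_stop_and_flee (participant_id : Int) (motion_changes : List Int) (out : Bool) : Prop := out = detect_stop_and_flee_alt participant_id motion_changes
instance (participant_id : Int) (motion_changes : List Int) (out : Bool) : Decidable (Spec_detect_stop_and_flee participant_id motion_changes out) := by unfold Spec_detect_stop_and_flee; infer_instance

-- ===== CLAIM (what is proved, stated in full; the proofs are below) =====
def Claim_equal_detect_stop_and_flee : Prop := ∀ (participant_id : Int) (motion_changes : List Int), Dom_detect_stop_and_flee participant_id motion_changes → Spec_detect_stop_and_flee participant_id motion_changes (detect_stop_and_flee participant_id motion_changes)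

-- ===== LEMMAS AND PROOFS =====

-- ===== VERDICT (by name: the statement is the Claim_ definition above) =====
-- body of A's fold
def pvStepA : Bool × Bool → Int → Bool × Bool :=
  fun s change =>
    if change == 0 then (true, s.2)
    else if change > 2 && s.1 then (s.1, true)
    else s

theorem pvStepA_eq : (fun (s : Bool × Bool) (change : Int) =>
    if change == 0 then (true, s.2)
    else if change > 2 && s.1 then (s.1, true)
    else s) = pvStepA := rfl

-- once stopped, the fold stays stopped and records any change > 2
theorem pv_foldl_true (xs : List Int) (m : Bool) :
    xs.foldl pvStepA (true, m) = (true, m || xs.any (fun c => decide (c > 2))) := by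
  induction xs generalizing m with
  | nil => simp
  | cons x xs ih =>
    simp only [List.foldl_cons, List.any_cons, pvStepA]
    by_cases h0 : x = 0
    · subst h0; simp [ih]
    · by_cases h2 : x > 2
      · simp [h0, h2, ih]
      · simp [h0, h2, ih]

theorem pv_slice_nat (xs : List Int) (n : Nat) :
    PySem.List.slice xs (some ((n : Int) + 1)) none = xs.drop (n + 1) := by
  have : ((n : Int) + 1) = ((n + 1 : Nat) : Int) := by push_cast; ring
  rw [this, PySem.List.slice_from_natCast]

theorem pv_main (pid : Int) (xs : List Int) :
    detect_stop_and_flee pid xs = detect_stop_and_flee_alt pid xs := by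
  induction xs with
  | nil => rfl
  | cons x xs ih =>
    by_cases h0 : x = 0
    · subst h0
      simp only [detect_stop_and_flee, detect_stop_and_flee_alt, List.foldl_cons,
        pvStepA_eq, PySem.List.index?_cons_self]
      have hst : pvStepA (false, false) (0 : Int) = (true, false) := by decide
      rw [hst, pv_foldl_true, pv_slice_nat]
      simp
    · have hstep : pvStepA (false, false) x = (false, false) := by
        simp [pvStepA, h0]
      have hA : detect_stop_and_flee pid (x :: xs) = detect_stop_and_flee pid xs := by
        simp only [detect_stop_and_flee, List.foldl_cons, pvStepA_eq, hstep]
      have hidx : PySem.List.index? (x :: xs) (0 : Int) =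
          (PySem.List.index? xs (0 : Int)).map (· + 1) :=
        PySem.List.index?_cons_of_ne _ h0
      have hB : detect_stop_and_flee_alt pid (x :: xs) = detect_stop_and_flee_alt pid xs := by
        simp only [detect_stop_and_flee_alt, hidx]
        cases hi : PySem.List.index? xs (0 : Int) with
        | none => rfl
        | some i =>
          simp only [Option.map_some]
          rw [pv_slice_nat, pv_slice_nat]
          simp [List.drop_succ_cons]
      rw [hA, hB, ih]

theorem detect_stop_and_flee_spec : Claim_equal_detect_stop_and_flee := by
  intro pid xs _
  exact pv_main pid xs
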